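-- pv_equiv track=rewrite | github.com/christophe-ye-biname/codewars | test.py | ifminus
-- ===== SOURCE A (Python) =====
-- def ifminus(string):
--     i = 0
--     while i < len(string):
--         if (string[i] == '/' or string[i] == '*') and string[i+1] == '-':
--             if str(string[i+2])[0] == '-':
--                 string = string[:i+1] + [str(string[i+2])[1:]] + string[i+3:]
--             else:
--                 string = string[:i+1] + ['-' + str(string[i+2])] + string[i+3:]
--             i = 0
--         i += 1
--     return string
-- ===== SOURCE B (Python) =====
-- def ifminus(string):
--     res = []
--     i = 0
--     n = len(string)
--     while i < n:
--         t = string[i]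
--         if (t == '*' or t == '/') and string[i+1] == '-':
--             nxt = str(string[i+2])
--             res.append(t)
--             res.append(nxt[1:] if nxt[0] == '-' else '-' + nxt)
--             i += 3
--         else:
--             res.append(t)
--             i += 1
--     return res
-- ===== Notes on version B (the rewrite author's own statement) =====
-- stated objective: alternative
-- what changed: B builds a fresh result list in one forward pass over the input (consuming three tokens per merge) instead of A's rewrite-the-whole-list-and-restart-the-scan loop; Pre_ excludes the inputs where A raises IndexError and the degenerate operand tokens '', '--', '-*', '-/' (and '*'/'/' tokens that only occur as operands), on which A's restart-from-position-1 rescanning can cascade into a second merge or a crash that a single pass does not reproduce.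
-- outside the precondition, e.g. on ifminus(['x', '*', '-', '--', '5']): A returns ['x', '*', '-5'], B returns ['x', '*', '-', '5']; on ifminus(['*', '-', '-*', '-', '5']): A returns ['*', '*', '-5'], B returns ['*', '*', '-', '5']; on ifminus(['*', '-', '*']): A returns ['*', '-*'], B returns ['*', '-*']
import Mathlib
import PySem

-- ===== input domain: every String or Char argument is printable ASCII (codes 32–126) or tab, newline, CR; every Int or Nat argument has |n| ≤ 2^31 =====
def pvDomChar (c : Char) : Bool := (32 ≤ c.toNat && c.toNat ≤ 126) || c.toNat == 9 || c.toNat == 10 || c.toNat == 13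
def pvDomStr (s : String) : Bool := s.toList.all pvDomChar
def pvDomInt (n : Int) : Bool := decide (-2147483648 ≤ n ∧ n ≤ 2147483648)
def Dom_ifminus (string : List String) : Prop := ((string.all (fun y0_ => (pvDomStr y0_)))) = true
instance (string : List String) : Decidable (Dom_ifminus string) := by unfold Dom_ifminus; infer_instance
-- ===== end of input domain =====

-- B replaces A's rewrite-list-and-restart-scan loop by a single forward pass building a fresh
-- result list (objective: alternative algorithm; no speed claim).


-- ===== PORT A =====
-- Literal port of A's while-loop: on a merge the list is rewritten and the scan restarts
-- (i = 0; i += 1 → next index 1).  Where Python raises IndexError (s[i+1]/s[i+2] out of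
-- range, or str(s[i+2])[0] on an empty token) the port returns the current list; those
-- inputs are excluded by Pre_ifminus.
def ifminusLoop (s : List String) (i : Nat) : List String :=
  if h : i < s.length then
    if s[i] = "/" ∨ s[i] = "*" then
      match h1 : s[i+1]? with
      | none => s          -- Python: IndexError (outside Pre_)
      | some t =>
        if t = "-" then
          match h2 : s[i+2]? with
          | none => s      -- Python: IndexError (outside Pre_)
          | some u =>
            match u.toList with
            | [] => s      -- Python: IndexError on str(...)[0] (outside Pre_)
            | c :: cs =>
              if c = '-' then
                ifminusLoop (s.take (i+1) ++ [String.ofList cs] ++ s.drop (i+3)) 1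
              else
                ifminusLoop (s.take (i+1) ++ ["-" ++ u] ++ s.drop (i+3)) 1
        else ifminusLoop s (i+1)
    else ifminusLoop s (i+1)
  else s
termination_by (s.length, s.length + 1 - i)
decreasing_by
  · have hlt : i + 2 < s.length := (List.getElem?_eq_some_iff.mp h2).1
    have : (s.take (i+1) ++ [String.ofList cs] ++ s.drop (i+3)).length = s.length - 1 := by
      simp [List.length_append, List.length_take, List.length_drop]; omega
    exact Prod.Lex.left _ _ (by omega)
  · have hlt : i + 2 < s.length := (List.getElem?_eq_some_iff.mp h2).1
    have : (s.take (i+1) ++ ["-" ++ u] ++ s.drop (i+3)).length = s.length - 1 := by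
      simp [List.length_append, List.length_take, List.length_drop]; omega
    exact Prod.Lex.left _ _ (by omega)
  · exact Prod.Lex.right _ (by omega)
  · exact Prod.Lex.right _ (by omega)

def ifminus (string : List String) : List String := ifminusLoop string 0

-- ===== PORT B =====
-- Literal port of B's single forward pass appending to res; on the same out-of-range/empty-
-- token inputs (outside Pre_ifminus) Python B raises IndexError and the port returns res.
def ifminusAltLoop (s : List String) (i : Nat) (res : List String) : List String :=
  if h : i < s.length then
    if (s[i] = "*" ∨ s[i] = "/") ∧ s[i+1]? = some "-" then
      match s[i+2]? with
      | none => res        -- Python: IndexError (outside Pre_)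
      | some nxt =>
        match nxt.toList with
        | [] => res        -- Python: IndexError on nxt[0] (outside Pre_)
        | c :: cs =>
          ifminusAltLoop s (i+3) (res ++ [s[i], if c = '-' then String.ofList cs else "-" ++ nxt])
    else ifminusAltLoop s (i+1) (res ++ [s[i]])
  else res
termination_by s.length - i
decreasing_by all_goals omega

def ifminus_alt (string : List String) : List String := ifminusAltLoop string 0 []

-- ===== PRECONDITION & SPEC =====
-- Pre_ excludes (a) inputs on which A raises IndexError (a '*'/'/' with no following token,
-- a '*'/'/' '-' pair with no operand or an empty operand token) and (b) the degenerate
-- operand tokens '--', '-*', '-/' after a '*'/'/' '-' pair, on which A's restart-from-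
-- position-1 rescanning lets the freshly merged token start a second merge (or crash) that
-- a single pass does not see.  The condition is stated for EVERY '*'/'/' position, so it
-- also (narrowly) excludes some inputs A returns on where such a token only occurs as an
-- operand, e.g. ['*','-','*'] — see the cites in the claim.
def Pre_ifminus (string : List String) : Prop :=
  ∀ j < string.length,
    (string[j]? = some "*" ∨ string[j]? = some "/") →
      j + 1 < string.length ∧
      (string[j+1]? = some "-" →
        j + 2 < string.length ∧ string[j+2]? ≠ some "" ∧ string[j+2]? ≠ some "--" ∧
        string[j+2]? ≠ some "-*" ∧ string[j+2]? ≠ some "-/")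
instance (string : List String) : Decidable (Pre_ifminus string) := by
  unfold Pre_ifminus; exact Nat.decidableBallLT _ _

def pvWitness_ifminus : List String := ["3", "*", "-", "4"]

def Spec_ifminus (string : List String) (out : List String) : Prop := out = ifminus_alt string
instance (string : List String) (out : List String) : Decidable (Spec_ifminus string out) := by
  unfold Spec_ifminus; infer_instance

-- ===== CLAIM (what is proved, stated in full; the proofs are below) =====
def Claim_equal_ifminus : Prop :=
  ∀ (string : List String), Dom_ifminus string → Pre_ifminus string →
    Spec_ifminus string (ifminus string)

-- ===== LEMMAS AND PROOFS =====

-- "a merge fires at position k" of a token list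
def patL (l : List String) (k : Nat) : Prop :=
  (l[k]? = some "*" ∨ l[k]? = some "/") ∧ l[k+1]? = some "-"

-- the merged token: none exactly when Python's str(u)[0] raises
def negTok (u : String) : Option String :=
  match u.toList with
  | [] => none
  | c :: cs => some (if c = '-' then String.ofList cs else "-" ++ u)

-- list-structural rendering of B's pass (proof vehicle only)
def altB : List String → List String
  | [] => []
  | [a] => [a]
  | [a, b] => if (a = "*" ∨ a = "/") ∧ b = "-" then [] else a :: altB [b]
  | a :: b :: c :: rest =>
    if (a = "*" ∨ a = "/") ∧ b = "-" then
      match negTok c with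
      | none => []
      | some m => a :: m :: altB rest
    else a :: altB (b :: c :: rest)

theorem patL_cons_succ (a : String) (l : List String) (k : Nat) :
    patL (a :: l) (k + 1) ↔ patL l k := by simp [patL]

theorem patL_drop (l : List String) (n k : Nat) :
    patL (l.drop n) k ↔ patL l (n + k) := by
  simp [patL, List.getElem?_drop, Nat.add_assoc]

theorem altB_cons_not (a : String) (l : List String)
    (h : ¬ ((a = "*" ∨ a = "/") ∧ l.head? = some "-")) : altB (a :: l) = a :: altB l := by
  match l with
  | [] => simp [altB]
  | [b] =>
    have hb : ¬ ((a = "*" ∨ a = "/") ∧ b = "-") := by simpa using h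
    simp [altB, hb]
  | b :: c :: r =>
    have hb : ¬ ((a = "*" ∨ a = "/") ∧ b = "-") := by simpa using h
    simp [altB, hb]

theorem altB_pass : ∀ (x rest : List String),
    (∀ k < x.length, ¬ patL (x ++ rest) k) → altB (x ++ rest) = x ++ altB rest := by
  intro x
  induction x with
  | nil => intro rest _; simp
  | cons a x' ih =>
    intro rest h
    have h0 : ¬ ((a = "*" ∨ a = "/") ∧ (x' ++ rest).head? = some "-") := by
      have := h 0 (by simp)
      simpa [patL, List.head?_eq_getElem?] using this
    have step : altB (a :: (x' ++ rest)) = a :: altB (x' ++ rest) := altB_cons_not _ _ h0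
    have ih' := ih rest (fun k hk => by
      have := h (k + 1) (by simpa using Nat.succ_lt_succ hk)
      simpa [patL_cons_succ] using this)
    simp [step, ih']

-- B's index loop computes res ++ altB (suffix)
theorem altGo_eq (s : List String) : ∀ n i res, s.length ≤ i + n →
    ifminusAltLoop s i res = res ++ altB (s.drop i) := by
  intro n
  induction n with
  | zero =>
    intro i res hle
    have h : ¬ i < s.length := by omega
    rw [ifminusAltLoop]
    simp [h, List.drop_eq_nil_of_le (by omega : s.length ≤ i), altB]
  | succ n ih =>
    intro i res hle
    by_cases h : i < s.length
    · rw [ifminusAltLoop]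
      by_cases hc : (s[i] = "*" ∨ s[i] = "/") ∧ s[i+1]? = some "-"
      · obtain ⟨hop, hminus⟩ := hc
        have hi1 : i + 1 < s.length := (List.getElem?_eq_some_iff.mp hminus).1
        have hgm : s[i+1] = "-" := (List.getElem?_eq_some_iff.mp hminus).2
        have hd0 : s.drop i = s[i] :: "-" :: s.drop (i+2) := by
          rw [List.drop_eq_getElem_cons h, List.drop_eq_getElem_cons hi1, hgm]
        cases h2 : s[i+2]? with
        | none =>
          have hi2 : s.length ≤ i + 2 := by
            by_contra hx
            exact absurd h2 (by simp; omega)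
          have hd : s.drop i = [s[i], "-"] := by
            rw [hd0, List.drop_eq_nil_of_le hi2]
          simp [h, hop, hminus, hd, altB]
        | some u =>
          have hi2 : i + 2 < s.length := (List.getElem?_eq_some_iff.mp h2).1
          have hgu : s[i+2] = u := (List.getElem?_eq_some_iff.mp h2).2
          have hd : s.drop i = s[i] :: "-" :: u :: s.drop (i+3) := by
            rw [hd0, List.drop_eq_getElem_cons hi2, hgu]
          cases hu : u.toList with
          | nil => simp [h, hop, hminus, hu, hd, altB, negTok]
          | cons c cs =>
            rw [dif_pos h, if_pos ⟨hop, hminus⟩]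
            simp only [hu]
            rw [ih (i+3) _ (by omega), hd]
            simp [altB, negTok, hu, hop]
      · rw [dif_pos h, if_neg hc, ih (i+1) _ (by omega),
            List.drop_eq_getElem_cons h,
            altB_cons_not s[i] (s.drop (i+1)) (by
              simpa [List.head?_drop] using hc)]
        simp
    · rw [ifminusAltLoop]
      simp [h, List.drop_eq_nil_of_le (by omega : s.length ≤ i), altB]

-- getElem? of the rewritten list
theorem getElem?_merged (s : List String) (i : Nat) (m : String) (hi2 : i + 2 < s.length)
    (j : Nat) : (s.take (i+1) ++ [m] ++ s.drop (i+3))[j]? =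
      if j ≤ i then s[j]? else if j = i + 1 then some m else s[j+1]? := by
  have hlt : (s.take (i+1)).length = i + 1 := by simp; omega
  by_cases h1 : j ≤ i
  · have ha : j < (s.take (i+1)).length := by omega
    have hb : j < (s.take (i+1) ++ [m]).length := by simp [hlt]; omega
    rw [List.getElem?_append_left hb, List.getElem?_append_left ha, List.getElem?_take]
    simp [h1, Nat.lt_succ_of_le h1]
  · by_cases h2 : j = i + 1
    · subst h2
      have hb : i + 1 < (s.take (i+1) ++ [m]).length := by simp [hlt]
      rw [List.getElem?_append_left hb, List.getElem?_append_right (by omega)]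
      simp [hlt, h1]
    · have hj : i + 2 ≤ j := by omega
      rw [List.getElem?_append_right (by simp [hlt]; omega), List.getElem?_drop]
      have he : i + 3 + (j - (s.take (i+1) ++ [m]).length) = j + 1 := by
        simp [hlt]; omega
      rw [he, if_neg h1, if_neg h2]

-- facts about the merged token
theorem negTok_ne (u m : String) (h : negTok u = some m)
    (h2 : u ≠ "--") (h3 : u ≠ "-*") (h4 : u ≠ "-/") : m ≠ "-" ∧ m ≠ "*" ∧ m ≠ "/" := by
  unfold negTok at h
  cases hu : u.toList with
  | nil => rw [hu] at h; exact absurd h (by simp)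
  | cons c cs =>
    rw [hu] at h
    have hm : m = if c = '-' then String.ofList cs else "-" ++ u := by
      simpa using h.symm
    by_cases hc : c = '-'
    · subst hc
      rw [if_pos rfl] at hm
      have hcs : m.toList = cs := by rw [hm, String.toList_ofList]
      refine ⟨fun he => h2 ?_, fun he => h3 ?_, fun he => h4 ?_⟩
      · have hx : cs = ['-'] := by rw [← hcs, he]; rfl
        apply String.toList_inj.mp; rw [hu, hx]; rfl
      · have hx : cs = ['*'] := by rw [← hcs, he]; rfl
        apply String.toList_inj.mp; rw [hu, hx]; rfl
      · have hx : cs = ['/'] := by rw [← hcs, he]; rfl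
        apply String.toList_inj.mp; rw [hu, hx]; rfl
    · rw [if_neg hc] at hm
      have hml : m.toList = '-' :: u.toList := by
        rw [hm, String.toList_append]; rfl
      refine ⟨fun he => ?_, fun he => ?_, fun he => ?_⟩ <;>
        rw [he, hu] at hml <;> simp at hml

-- the master lemma: A's scan from i equals prefix ++ B's pass over the suffix
theorem masterA (L : Nat) : ∀ k s i, s.length ≤ L → s.length - i ≤ k → Pre_ifminus s →
    (∀ j < i, ¬ patL s j) → ifminusLoop s i = s.take i ++ altB (s.drop i) := by
  induction L with
  | zero =>
    intro k s i hL _ _ _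
    have hs : s = [] := List.eq_nil_of_length_eq_zero (by omega)
    subst hs
    rw [ifminusLoop]; simp [altB]
  | succ L ihL =>
    intro k
    induction k with
    | zero =>
      intro s i hL hk hpre hleft
      have h : ¬ i < s.length := by omega
      rw [ifminusLoop]
      simp [h, List.take_of_length_le (by omega : s.length ≤ i),
            List.drop_eq_nil_of_le (by omega : s.length ≤ i), altB]
    | succ k ihk =>
      intro s i hL hk hpre hleft
      by_cases h : i < s.length
      · by_cases hop : s[i] = "/" ∨ s[i] = "*"
        · have hops : s[i]? = some "*" ∨ s[i]? = some "/" := by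
            rw [List.getElem?_eq_getElem h]
            rcases hop with h' | h' <;> simp [h']
          have hpre_i := hpre i h hops
          have hi1 : i + 1 < s.length := hpre_i.1
          cases h1 : s[i+1]? with
          | none => exact absurd h1 (by simp; omega)
          | some t =>
            by_cases ht : t = "-"
            · subst ht
              have hcond := hpre_i.2 h1
              have hi2 : i + 2 < s.length := hcond.1
              cases h2 : s[i+2]? with
              | none => exact absurd h2 (by simp; omega)
              | some u =>
                rw [h2] at hcond
                have hne : u ≠ "" ∧ u ≠ "--" ∧ u ≠ "-*" ∧ u ≠ "-/" := by
                  refine ⟨fun he => ?_, fun he => ?_, fun he => ?_, fun he => ?_⟩ <;>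
                    subst he <;> simp at hcond
                cases hu : u.toList with
                | nil =>
                  exact absurd (String.toList_inj.mp (by rw [hu]; rfl)) hne.1
                | cons c cs =>
                  have hnt : negTok u = some (if c = '-' then String.ofList cs else "-" ++ u) := by
                    simp [negTok, hu]
                  set m := if c = '-' then String.ofList cs else "-" ++ u with hm
                  set s' := s.take (i+1) ++ [m] ++ s.drop (i+3) with hs'
                  have hstep : ifminusLoop s i = ifminusLoop s' 1 := by
                    rw [ifminusLoop]
                    simp only [dif_pos h, if_pos hop]
                    split
                    · next heq => rw [h1] at heq; cases heq
                    · next t heq =>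
                      rw [h1] at heq; injection heq with heq'; subst heq'
                      rw [if_pos rfl]
                      split
                      · next heq2 => rw [h2] at heq2; cases heq2
                      · next u' heq2 =>
                        rw [h2] at heq2; injection heq2 with he2; subst he2
                        rw [hu]
                        by_cases hc : c = '-' <;> simp [hc, hs', hm]
                  have hlen' : s'.length = s.length - 1 := by
                    rw [hs']; simp; omega
                  have hget := getElem?_merged s i m hi2
                  have hgA : ∀ j, j ≤ i → s'[j]? = s[j]? := fun j hj => by
                    rw [hs', hget j, if_pos hj]
                  have hgB : s'[i+1]? = some m := by
                    rw [hs', hget (i+1), if_neg (by omega), if_pos rfl]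
                  have hgC : ∀ j, i + 2 ≤ j → s'[j]? = s[j+1]? := fun j hj => by
                    rw [hs', hget j, if_neg (by omega), if_neg (by omega)]
                  have hmne := negTok_ne u m hnt hne.2.1 hne.2.2.1 hne.2.2.2
                  have hnopat : ∀ p ≤ i + 1, ¬ patL s' p := by
                    intro p hp hpat
                    rcases hpat with ⟨hpo, hpm⟩
                    by_cases hpi : p < i
                    · rw [hgA p (by omega)] at hpo
                      rw [hgA (p+1) (by omega)] at hpm
                      exact hleft p hpi ⟨hpo, hpm⟩
                    · by_cases hpe : p = i
                      · subst hpe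
                        rw [hgB] at hpm
                        exact hmne.1 (by injection hpm)
                      · have : p = i + 1 := by omega
                        subst this
                        rw [hgB] at hpo
                        rcases hpo with h' | h'
                        · exact hmne.2.1 (by injection h')
                        · exact hmne.2.2 (by injection h')
                  have hpre' : Pre_ifminus s' := by
                    intro j hj hjop
                    by_cases hji : j ≤ i
                    · by_cases hjlt : j < i
                      · refine ⟨by omega, fun hx => ?_⟩
                        rw [hgA j hji] at hjop
                        rw [hgA (j+1) (by omega)] at hx
                        exact absurd ⟨hjop, hx⟩ (hleft j hjlt)
                      · have hje : j = i := by omega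
                        subst hje
                        refine ⟨by omega, fun hx => ?_⟩
                        rw [hgB] at hx
                        exact absurd (by injection hx) hmne.1
                    · by_cases hj1 : j = i + 1
                      · subst hj1
                        rw [hgB] at hjop
                        rcases hjop with h' | h'
                        · exact absurd (by injection h') hmne.2.1
                        · exact absurd (by injection h') hmne.2.2
                      · have hj2 : i + 2 ≤ j := by omega
                        rw [hgC j hj2] at hjop
                        have hjlen : j + 1 < s.length := by omega
                        have hp := hpre (j+1) hjlen hjop
                        refine ⟨by omega, fun hx => ?_⟩
                        rw [hgC (j+1) (by omega)] at hx
                        have hq := hp.2 hx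
                        refine ⟨by omega, ?_, ?_, ?_, ?_⟩ <;>
                          rw [hgC (j+2) (by omega)]
                        · exact hq.2.1
                        · exact hq.2.2.1
                        · exact hq.2.2.2.1
                        · exact hq.2.2.2.2
                  have hrec : ifminusLoop s' 1 = s'.take 1 ++ altB (s'.drop 1) :=
                    ihL s'.length s' 1 (by omega) (by omega) hpre'
                      (fun j hj => by
                        have : j = 0 := by omega
                        subst this; exact hnopat 0 (by omega))
                  -- split s'.drop 1 into the untouched prefix and the remaining suffix
                  have hsplit : s'.drop 1 = ((s.take (i+1)).drop 1 ++ [m]) ++ s.drop (i+3) := by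
                    rw [hs', List.drop_append_of_le_length (by simp)]
                    congr 1
                    rw [List.drop_append_of_le_length (by simp; omega)]
                  have hylen : ((s.take (i+1)).drop 1 ++ [m]).length = i + 1 := by
                    simp; omega
                  have hpass : altB (s'.drop 1) =
                      ((s.take (i+1)).drop 1 ++ [m]) ++ altB (s.drop (i+3)) := by
                    rw [hsplit]
                    refine altB_pass _ _ (fun p hp hpat => ?_)
                    rw [← hsplit, patL_drop] at hpat
                    exact hnopat (1 + p) (by omega) hpat
                  have hcancel : s'.take 1 ++ ((s.take (i+1)).drop 1 ++ [m]) =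
                      s.take (i+1) ++ [m] := by
                    apply List.append_cancel_right (bs := s.drop (i+3))
                    rw [List.append_assoc, ← hsplit, List.take_append_drop, hs']
                  have hgm2 : s[i+1] = "-" := (List.getElem?_eq_some_iff.mp h1).2
                  have hgu : s[i+2] = u := (List.getElem?_eq_some_iff.mp h2).2
                  have hdi : s.drop i = s[i] :: "-" :: u :: s.drop (i+3) := by
                    rw [List.drop_eq_getElem_cons h, List.drop_eq_getElem_cons hi1, hgm2,
                        List.drop_eq_getElem_cons hi2, hgu]
                  have hop' : s[i] = "*" ∨ s[i] = "/" := hop.symm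
                  have haltd : altB (s.drop i) = s[i] :: m :: altB (s.drop (i+3)) := by
                    rw [hdi]
                    simp [altB, hop', negTok, hu, hm]
                  rw [hstep, hrec, hpass, haltd, ← List.append_assoc, hcancel]
                  rw [List.take_succ_eq_append_getElem h, List.append_assoc,
                      List.append_assoc]
                  rfl
            · -- t ≠ "-": plain step to i+1
              have hstep : ifminusLoop s i = ifminusLoop s (i+1) := by
                rw [ifminusLoop]
                simp only [dif_pos h, if_pos hop]
                split
                · next heq => rw [h1] at heq; cases heq
                · next t' heq =>
                  rw [h1] at heq; injection heq with heq'; subst heq'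
                  rw [if_neg ht]
              have hleft' : ∀ j < i + 1, ¬ patL s j := by
                intro j hj hpat
                by_cases hjlt : j < i
                · exact hleft j hjlt hpat
                · have : j = i := by omega
                  subst this
                  have hx := hpat.2
                  rw [h1] at hx
                  exact ht (by injection hx)
              rw [hstep, ihk s (i+1) hL (by omega) hpre hleft',
                  List.drop_eq_getElem_cons h,
                  altB_cons_not s[i] (s.drop (i+1))
                    (by simp [List.head?_drop, h1]; intro _ hx; exact ht hx)]
              rw [List.take_succ_eq_append_getElem h, List.append_assoc]
              rfl
        · -- s[i] is not an operator
          have hstep : ifminusLoop s i = ifminusLoop s (i+1) := by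
            rw [ifminusLoop]
            simp only [dif_pos h, if_neg hop]
          have hleft' : ∀ j < i + 1, ¬ patL s j := by
            intro j hj hpat
            by_cases hjlt : j < i
            · exact hleft j hjlt hpat
            · have : j = i := by omega
              subst this
              rcases hpat.1 with h' | h' <;>
                rw [List.getElem?_eq_getElem h] at h' <;>
                exact hop (by simp at h'; simp [h'])
          rw [hstep, ihk s (i+1) hL (by omega) hpre hleft',
              List.drop_eq_getElem_cons h,
              altB_cons_not s[i] (s.drop (i+1))
                (by intro hx; exact hop (hx.1.symm))]
          rw [List.take_succ_eq_append_getElem h, List.append_assoc]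
          rfl
      · rw [ifminusLoop]
        simp [h, List.take_of_length_le (by omega : s.length ≤ i),
              List.drop_eq_nil_of_le (by omega : s.length ≤ i), altB]

-- ===== VERDICT (by name: the statement is the Claim_ definition above) =====
theorem ifminus_spec : Claim_equal_ifminus := by
  intro s _ hpre
  unfold Spec_ifminus ifminus ifminus_alt
  rw [masterA s.length s.length s 0 le_rfl (by omega) hpre (by omega),
      altGo_eq s s.length 0 [] (by omega)]
  simp
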